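-- pv_equiv track=rewrite | github.com/bhavadharani-2005/endee | Job Matcher/rag.py | extract_resume_skills
-- ===== SOURCE A (Python) =====
-- from typing import Any
--
-- def extract_resume_skills(resume_text: str, jobs: list[dict[str, Any]]) -> list[str]:
--     resume_lower = resume_text.lower()
--     unique_skills: list[str] = []
--     seen: set[str] = set()
--
--     for job in jobs:
--         for skill in job.get("skills", []):
--             normalized = skill.lower()
--             if normalized in resume_lower and normalized not in seen:
--                 unique_skills.append(skill)
--                 seen.add(normalized)
--     return unique_skills
-- ===== SOURCE B (Python) =====
-- def extract_resume_skills(resume_text, jobs):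
--     resume_lower = resume_text.lower()
--     matched = [skill
--                for job in jobs
--                for skill in job.get("skills", [])
--                if skill.lower() in resume_lower]
--
--     def nub(xs):
--         if not xs:
--             return []
--         head = xs[0]
--         head_lower = head.lower()
--         return [head] + nub([x for x in xs[1:] if x.lower() != head_lower])
--
--     return nub(matched)
-- ===== Notes on version B (the rewrite author's own statement) =====
-- stated objective: alternative
-- what changed: B first collects every skill occurrence whose lowercase is a substring of the lowered resume, then deduplicates that list by a recursive nub that keeps the head and filters all later same-lowercase occurrences out of the tail, instead of A's nested loops threading a mutable seen-set; no set or dict is maintained at all.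
import Mathlib
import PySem

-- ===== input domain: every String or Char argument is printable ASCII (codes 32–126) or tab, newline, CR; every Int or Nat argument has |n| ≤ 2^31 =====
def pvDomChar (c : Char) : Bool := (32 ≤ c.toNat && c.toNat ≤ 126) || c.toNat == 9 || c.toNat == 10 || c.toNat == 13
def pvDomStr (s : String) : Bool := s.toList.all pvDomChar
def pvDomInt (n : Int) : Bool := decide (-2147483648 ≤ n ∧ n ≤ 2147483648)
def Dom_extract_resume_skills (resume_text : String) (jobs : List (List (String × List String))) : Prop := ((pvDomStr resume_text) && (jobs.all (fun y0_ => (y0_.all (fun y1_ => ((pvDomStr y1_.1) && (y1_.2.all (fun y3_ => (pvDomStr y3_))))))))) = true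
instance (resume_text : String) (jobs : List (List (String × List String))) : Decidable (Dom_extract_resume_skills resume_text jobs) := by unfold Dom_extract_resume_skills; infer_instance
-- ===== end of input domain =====

-- B collects the matching skill occurrences first and then deduplicates them with a
-- recursive nub (keep head, filter same-lowercase occurrences out of the tail) instead of
-- A's nested loops threading a seen-set (objective: alternative decomposition).

-- ===== PORT A =====
def extract_resume_skills (resume_text : String) (jobs : List (List (String × List String))) : List String :=
  let resume_lower := PySem.Str.lower resume_text
  (jobs.foldl
      (fun (st : List String × PySem.Set String) job =>
        (PySem.Dict.getD (PySem.Dict.mk job) "skills" []).foldl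
          (fun (st : List String × PySem.Set String) skill =>
            let normalized := PySem.Str.lower skill
            if PySem.Str.isIn normalized resume_lower && !(PySem.Set.contains st.2 normalized) then
              (st.1 ++ [skill], PySem.Set.add st.2 normalized)
            else st)
          st)
      (([] : List String), (PySem.Set.empty : PySem.Set String))).1

-- ===== PORT B =====
-- recursive nub from Source B: keep the head, drop later same-lowercase occurrences from the tail
def pvNub : List String → List String
  | [] => []
  | h :: t =>
    let head_lower := PySem.Str.lower h
    h :: pvNub (t.filter (fun x => PySem.Str.lower x != head_lower))
termination_by xs => xs.length
decreasing_by
  simpa using Nat.lt_succ_of_le (List.length_filter_le _ _)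

def extract_resume_skills_alt (resume_text : String) (jobs : List (List (String × List String))) : List String :=
  let resume_lower := PySem.Str.lower resume_text
  let matched :=
    (jobs.flatMap (fun job => PySem.Dict.getD (PySem.Dict.mk job) "skills" [])).filter
      (fun skill => PySem.Str.isIn (PySem.Str.lower skill) resume_lower)
  pvNub matched

-- ===== PRECONDITION & SPEC =====
def Spec_extract_resume_skills (resume_text : String) (jobs : List (List (String × List String))) (out : List String) : Prop := out = extract_resume_skills_alt resume_text jobs
instance (resume_text : String) (jobs : List (List (String × List String))) (out : List String) : Decidable (Spec_extract_resume_skills resume_text jobs out) := by unfold Spec_extract_resume_skills; infer_instance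

-- ===== CLAIM =====
def Claim_equal_extract_resume_skills : Prop := ∀ (resume_text : String) (jobs : List (List (String × List String))), Dom_extract_resume_skills resume_text jobs → Spec_extract_resume_skills resume_text jobs (extract_resume_skills resume_text jobs)

-- ===== LEMMAS AND PROOFS =====

-- proof-side names for A's loop body and the skills lookup (definitionally the port's lambdas)
def pvSkillsOf (job : List (String × List String)) : List String :=
  PySem.Dict.getD (PySem.Dict.mk job) "skills" []

def pvStepA (R : String) (st : List String × PySem.Set String) (skill : String) :
    List String × PySem.Set String :=
  let normalized := PySem.Str.lower skill
  if PySem.Str.isIn normalized R && !(PySem.Set.contains st.2 normalized) then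
    (st.1 ++ [skill], PySem.Set.add st.2 normalized)
  else st

lemma pvFoldlNested {β : Type} (f : β → String → β)
    (jobs : List (List (String × List String))) (init : β) :
    jobs.foldl (fun b job => (pvSkillsOf job).foldl f b) init
      = (jobs.flatMap pvSkillsOf).foldl f init := by
  induction jobs generalizing init with
  | nil => rfl
  | cons j js ih => simp [List.foldl_append, ih]

lemma pvSetContainsAdd (s : PySem.Set String) (x y : String) :
    PySem.Set.contains (PySem.Set.add s x) y = true
      ↔ (y = x ∨ PySem.Set.contains s y = true) := by
  simp [pysem]; tauto

lemma pvCondAdd (R : String) (seen : PySem.Set String) (lx y : String) :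
    (PySem.Str.isIn (PySem.Str.lower y) R
        && !(PySem.Set.contains (PySem.Set.add seen lx) (PySem.Str.lower y)))
      = ((PySem.Str.lower y != lx)
          && (PySem.Str.isIn (PySem.Str.lower y) R
                && !(PySem.Set.contains seen (PySem.Str.lower y)))) := by
  by_cases h : PySem.Set.contains (PySem.Set.add seen lx) (PySem.Str.lower y) = true
  · rcases (pvSetContainsAdd seen lx (PySem.Str.lower y)).mp h with h1 | h1
    · simp [h1]
    · have h1' : PySem.Str.lower y ∈ seen := by simpa using h1
      simp [h1']
  · have h1 : PySem.Set.contains seen (PySem.Str.lower y) = false := by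
      cases hc : PySem.Set.contains seen (PySem.Str.lower y) with
      | false => rfl
      | true => exact absurd ((pvSetContainsAdd seen lx _).mpr (Or.inr hc)) h
    have h1' : PySem.Str.lower y ∉ seen := by
      simpa using h1
    have h2 : PySem.Str.lower y ≠ lx := fun he =>
      absurd ((pvSetContainsAdd seen lx _).mpr (Or.inl he)) h
    simp [h1', h2]

-- loop invariant: A's fold appends exactly the nub of the still-unseen matching tail
lemma pvLoopInv (R : String) (L : List String) (us : List String) (seen : PySem.Set String) :
    (L.foldl (pvStepA R) (us, seen)).1
      = us ++ pvNub (L.filter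
          (fun x => PySem.Str.isIn (PySem.Str.lower x) R
              && !(PySem.Set.contains seen (PySem.Str.lower x)))) := by
  induction L generalizing us seen with
  | nil => simp [pvNub]
  | cons x t ih =>
    rw [List.foldl_cons]
    by_cases hc : (PySem.Str.isIn (PySem.Str.lower x) R
        && !(PySem.Set.contains seen (PySem.Str.lower x))) = true
    · have hA : pvStepA R (us, seen) x
          = (us ++ [x], PySem.Set.add seen (PySem.Str.lower x)) := by
        unfold pvStepA; simp only [hc, if_pos]
      rw [hA, ih]
      conv_rhs => rw [List.filter_cons]
      simp only [hc, if_pos]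
      rw [pvNub]
      have hfil : t.filter (fun y => PySem.Str.isIn (PySem.Str.lower y) R
              && !(PySem.Set.contains (PySem.Set.add seen (PySem.Str.lower x))
                    (PySem.Str.lower y)))
          = (t.filter (fun y => PySem.Str.isIn (PySem.Str.lower y) R
              && !(PySem.Set.contains seen (PySem.Str.lower y)))).filter
              (fun y => PySem.Str.lower y != PySem.Str.lower x) := by
        rw [List.filter_filter]
        exact List.filter_congr (fun y _ => pvCondAdd R seen (PySem.Str.lower x) y)
      rw [hfil]
      simp
    · have hc' := Bool.eq_false_iff.mpr hc
      have hA : pvStepA R (us, seen) x = (us, seen) := by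
        unfold pvStepA; simp only [hc', Bool.false_eq_true, if_neg, not_false_eq_true]
      rw [hA, ih]
      conv_rhs => rw [List.filter_cons]
      simp only [hc', if_neg, Bool.false_eq_true, not_false_eq_true]

-- ===== VERDICT =====
theorem extract_resume_skills_spec : Claim_equal_extract_resume_skills := by
  intro resume_text jobs _
  show extract_resume_skills resume_text jobs = extract_resume_skills_alt resume_text jobs
  show (jobs.foldl (fun st job => (pvSkillsOf job).foldl (pvStepA (PySem.Str.lower resume_text)) st)
          (([] : List String), (PySem.Set.empty : PySem.Set String))).1
      = pvNub ((jobs.flatMap pvSkillsOf).filter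
          (fun s => PySem.Str.isIn (PySem.Str.lower s) (PySem.Str.lower resume_text)))
  rw [pvFoldlNested, pvLoopInv]
  simp [PySem.Set.empty, PySem.Set.contains]
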